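-- pv_equiv track=rewrite | github.com/Ferrari25/ParserASDPpy | Automatas.py | automataParenOpen
-- ===== SOURCE A (Python) =====
-- ESTADO_FINAL = "ESTADO FINAL"
--
-- ESTADO_NO_FINAL = "NO ACEPTADO"
--
-- ESTADO_TRAMPA = "EN ESTADO TRAMPA"
--
-- def automataParenOpen(lexema):
--     estadoactual = 0
--     estadosfinales = [1]
--
--     for vcarac in lexema:
--         if estadoactual == 0 and vcarac == '(':
--             estadoactual = 1
--         else:
--             estadoactual = -1
--             break
--
--     if estadoactual == -1:
--         return ESTADO_TRAMPA
--     elif estadoactual in estadosfinales: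
--         return ESTADO_FINAL
--     else:
--         return ESTADO_NO_FINAL
-- ===== SOURCE B (Python) =====
-- ESTADO_FINAL = "ESTADO FINAL"
-- ESTADO_NO_FINAL = "NO ACEPTADO"
-- ESTADO_TRAMPA = "EN ESTADO TRAMPA"
--
-- def automataParenOpen(lexema):
--     chars = list(lexema)
--     if chars == ['(']:
--         return ESTADO_FINAL
--     if chars == []:
--         return ESTADO_NO_FINAL
--     return ESTADO_TRAMPA
-- ===== Notes on version B (the rewrite author's own statement) =====
-- stated objective: simpler
-- what changed: Replaced the state-machine loop over the input with a direct closed-form classification of the materialised character sequence (exactly ['('] / empty / anything else); no state variable or loop remains.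
import Mathlib
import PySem

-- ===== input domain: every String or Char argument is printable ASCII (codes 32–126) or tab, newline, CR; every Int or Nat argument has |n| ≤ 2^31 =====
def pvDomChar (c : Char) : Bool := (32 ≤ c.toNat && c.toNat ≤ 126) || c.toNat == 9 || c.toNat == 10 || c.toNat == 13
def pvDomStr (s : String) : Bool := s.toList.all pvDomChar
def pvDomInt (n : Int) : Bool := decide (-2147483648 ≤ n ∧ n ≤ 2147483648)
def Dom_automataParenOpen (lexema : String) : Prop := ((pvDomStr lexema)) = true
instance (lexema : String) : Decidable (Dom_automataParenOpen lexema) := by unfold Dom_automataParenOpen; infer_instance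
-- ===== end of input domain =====

-- B replaces A's state-machine loop by a closed-form classification of the character list; objective: simpler.

-- ===== PORT A =====
-- the for-loop with break, as structural recursion over the characters carrying the state
def automataParenOpenLoop : List Char → Int → Int
  | [], estadoactual => estadoactual
  | vcarac :: rest, estadoactual =>
      if estadoactual == 0 && vcarac == '(' then automataParenOpenLoop rest 1
      else -1

def automataParenOpen (lexema : String) : String :=
  let estadoactual := automataParenOpenLoop lexema.toList 0
  let estadosfinales : List Int := [1]
  if estadoactual == -1 then "EN ESTADO TRAMPA"
  else if estadosfinales.contains estadoactual then "ESTADO FINAL"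
  else "NO ACEPTADO"

-- ===== PORT B =====
def automataParenOpen_alt (lexema : String) : String :=
  let chars := lexema.toList
  if chars = ['('] then "ESTADO FINAL"
  else if chars = [] then "NO ACEPTADO"
  else "EN ESTADO TRAMPA"

-- ===== PRECONDITION & SPEC =====
def Spec_automataParenOpen (lexema : String) (out : String) : Prop := out = automataParenOpen_alt lexema
instance (lexema : String) (out : String) : Decidable (Spec_automataParenOpen lexema out) := by unfold Spec_automataParenOpen; infer_instance

-- ===== CLAIM (what is proved, stated in full; the proofs are below) =====
def Claim_equal_automataParenOpen : Prop := ∀ (lexema : String), Dom_automataParenOpen lexema → Spec_automataParenOpen lexema (automataParenOpen lexema)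

-- ===== LEMMAS AND PROOFS =====
theorem automataParenOpen_cases (l : List Char) :
    (let estadoactual := automataParenOpenLoop l 0
     let estadosfinales : List Int := [1]
     if estadoactual == -1 then "EN ESTADO TRAMPA"
     else if estadosfinales.contains estadoactual then "ESTADO FINAL"
     else "NO ACEPTADO")
    = (if l = ['('] then "ESTADO FINAL" else if l = [] then "NO ACEPTADO" else "EN ESTADO TRAMPA") := by
  match l with
  | [] => simp [automataParenOpenLoop]
  | [c] =>
      by_cases h : c = '('
      · subst h; simp [automataParenOpenLoop]
      · simp [automataParenOpenLoop, h]
  | c :: d :: rest =>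
      by_cases h : c = '('
      · subst h; simp [automataParenOpenLoop]
      · simp [automataParenOpenLoop, h]

-- ===== VERDICT (by name: the statement is the Claim_ definition above) =====
theorem automataParenOpen_spec : Claim_equal_automataParenOpen := by
  intro lexema _
  unfold Spec_automataParenOpen automataParenOpen automataParenOpen_alt
  exact automataParenOpen_cases lexema.toList
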